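-- pv_equiv track=rewrite | github.com/MichaelYin1994/kesci-mobile-behavior | nn_lstm.py | corpus_to_sequence
-- ===== SOURCE A (Python) =====
-- def corpus_to_sequence(corpus=None):
--     # New corpus
--     word_index, new_corpus, count = {}, [], 0
--     for sentence in corpus:
--         new_sentence = []
--         for word in sentence:
--             if word in word_index:
--                 new_sentence.append(word_index[word])
--             else:
--                 new_sentence.append(str(count))
--                 word_index[word] = str(count)
--                 count += 1
--         new_corpus.append(new_sentence)
--     return new_corpus, word_index
-- ===== SOURCE B (Python) =====
-- def corpus_to_sequence(corpus=None):
--     # Two passes: build the vocabulary first, then encode the corpus.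
--     word_index = {}
--     for sentence in corpus:
--         for word in sentence:
--             if word not in word_index:
--                 word_index[word] = str(len(word_index))
--     new_corpus = [[word_index[word] for word in sentence] for sentence in corpus]
--     return new_corpus, word_index
-- ===== Notes on version B (the rewrite author's own statement) =====
-- stated objective: alternative
-- what changed: A interleaves vocabulary construction and encoding in one nested loop carrying (new_sentence, dict, counter); B first builds the vocabulary in a dedicated pass keyed on len(word_index), then encodes the whole corpus in a separate comprehension pass by plain lookup.
import Mathlib
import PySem

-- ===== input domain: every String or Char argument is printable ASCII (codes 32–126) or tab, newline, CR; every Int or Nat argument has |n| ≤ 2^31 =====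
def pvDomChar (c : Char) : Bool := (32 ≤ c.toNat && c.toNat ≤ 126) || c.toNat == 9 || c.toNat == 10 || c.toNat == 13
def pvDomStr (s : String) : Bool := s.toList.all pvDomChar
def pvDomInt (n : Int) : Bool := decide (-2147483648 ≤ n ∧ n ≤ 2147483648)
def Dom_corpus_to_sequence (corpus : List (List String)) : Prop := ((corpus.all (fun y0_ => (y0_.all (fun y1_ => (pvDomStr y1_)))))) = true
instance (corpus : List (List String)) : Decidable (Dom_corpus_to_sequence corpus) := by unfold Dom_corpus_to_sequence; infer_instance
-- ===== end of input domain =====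

-- B replaces A's single interleaved build-and-encode loop with two separate passes
-- (build vocabulary keyed on its current size, then encode by lookup): 'alternative' objective.

-- ===== PORT A =====
-- inner loop body: state is (new_sentence, word_index, count)
def pvInnerA (st : List String × PySem.Dict String String × Int) (word : String) :
    List String × PySem.Dict String String × Int :=
  let (ns, wi, count) := st
  if wi.contains word then
    (ns ++ [(wi.get? word).getD ""], wi, count)
  else
    (ns ++ [PySem.Int.toStr count], wi.insert word (PySem.Int.toStr count), count + 1)

-- outer loop body: state is (new_corpus, word_index, count)
def pvOuterA (st : List (List String) × PySem.Dict String String × Int) (sentence : List String) :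
    List (List String) × PySem.Dict String String × Int :=
  let (nc, wi, count) := st
  let r := sentence.foldl pvInnerA ([], wi, count)
  (nc ++ [r.1], r.2.1, r.2.2)

def corpus_to_sequence (corpus : List (List String)) : List (List String) × (List (String × String)) :=
  let r := corpus.foldl pvOuterA ([], PySem.Dict.empty, 0)
  (r.1, r.2.1.items)

-- ===== PORT B =====
-- first pass: add a word to the vocabulary if unseen, valued str(len(word_index))
def pvAddWord (wi : PySem.Dict String String) (w : String) : PySem.Dict String String :=
  if wi.contains w then wi else wi.insert w (PySem.Int.toStr (wi.size : Int))

def pvBuild (corpus : List (List String)) : PySem.Dict String String :=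
  corpus.foldl (fun wi sentence => sentence.foldl pvAddWord wi) PySem.Dict.empty

def corpus_to_sequence_alt (corpus : List (List String)) : List (List String) × (List (String × String)) :=
  let wi := pvBuild corpus
  (corpus.map (fun sentence => sentence.map (fun w => (wi.get? w).getD "")), wi.items)

-- ===== PRECONDITION & SPEC =====
def Spec_corpus_to_sequence (corpus : List (List String)) (out : List (List String) × (List (String × String))) : Prop := out = corpus_to_sequence_alt corpus
instance (corpus : List (List String)) (out : List (List String) × (List (String × String))) : Decidable (Spec_corpus_to_sequence corpus out) := by unfold Spec_corpus_to_sequence; infer_instance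

-- ===== CLAIM (what is proved, stated in full; the proofs are below) =====
def Claim_equal_corpus_to_sequence : Prop := ∀ (corpus : List (List String)), Dom_corpus_to_sequence corpus → Spec_corpus_to_sequence corpus (corpus_to_sequence corpus)

-- ===== LEMMAS AND PROOFS =====

-- "wi' extends wi": lookups that succeed in wi still succeed with the same value in wi'
def pvExt (wi wi' : PySem.Dict String String) : Prop :=
  ∀ w v, wi.get? w = some v → wi'.get? w = some v

theorem pvExt_refl (wi : PySem.Dict String String) : pvExt wi wi := fun _ _ h => h

theorem pvExt_trans {a b c : PySem.Dict String String} (h1 : pvExt a b) (h2 : pvExt b c) :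
    pvExt a c := fun w v h => h2 w v (h1 w v h)

theorem pvExt_addWord (wi : PySem.Dict String String) (w : String) : pvExt wi (pvAddWord wi w) := by
  unfold pvAddWord
  split_ifs with h
  · exact pvExt_refl wi
  · intro w' v hv
    rw [PySem.Dict.get?_insert]
    split_ifs with he
    · subst he
      rw [PySem.Dict.contains_eq_isSome_get?, hv] at h
      simp at h
    · exact hv

theorem pvExt_foldl_addWord (ws : List String) (wi : PySem.Dict String String) :
    pvExt wi (ws.foldl pvAddWord wi) := by
  induction ws generalizing wi with
  | nil => exact pvExt_refl wi
  | cons w ws ih => exact pvExt_trans (pvExt_addWord wi w) (ih _)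

theorem pvExt_foldl_sentences (cs : List (List String)) (wi : PySem.Dict String String) :
    pvExt wi (cs.foldl (fun wi s => s.foldl pvAddWord wi) wi) := by
  induction cs generalizing wi with
  | nil => exact pvExt_refl wi
  | cons s cs ih => exact pvExt_trans (pvExt_foldl_addWord s wi) (ih _)

-- A's inner fold = (previous encoded prefix ++ encode-with-final-dict, B's vocabulary fold, its size),
-- provided the final dict wiF extends the vocabulary after this sentence.
theorem pvInner_eq (ws : List String) (ns : List String) (wi wiF : PySem.Dict String String)
    (hext : pvExt (ws.foldl pvAddWord wi) wiF) :
    ws.foldl pvInnerA (ns, wi, (wi.size : Int)) =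
      (ns ++ ws.map (fun w => (wiF.get? w).getD ""), ws.foldl pvAddWord wi,
        ((ws.foldl pvAddWord wi).size : Int)) := by
  induction ws generalizing ns wi with
  | nil => simp
  | cons w ws ih =>
    simp only [List.foldl_cons, List.map_cons]
    rw [List.foldl_cons] at hext
    by_cases h : wi.contains w = true
    · -- seen before: dict unchanged, lookup survives to wiF
      rw [PySem.Dict.contains_eq_isSome_get?] at h
      obtain ⟨v, hv⟩ := Option.isSome_iff_exists.mp h
      have hF : wiF.get? w = some v :=
        hext w v ((pvExt_foldl_addWord ws (pvAddWord wi w)) w v (by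
          simp only [pvAddWord, PySem.Dict.contains_eq_isSome_get?, hv]
          simpa using hv))
      have hstep : pvInnerA (ns, wi, (wi.size : Int)) w =
          (ns ++ [(wi.get? w).getD ""], wi, (wi.size : Int)) := by
        simp [pvInnerA, PySem.Dict.contains_eq_isSome_get?, hv]
      have haw : pvAddWord wi w = wi := by
        simp [pvAddWord, PySem.Dict.contains_eq_isSome_get?, hv]
      rw [haw] at hext
      rw [hstep, haw]
      rw [ih (ns ++ [(wi.get? w).getD ""]) wi hext]
      simp [hv, hF]
    · -- new word: A appends str(count) and inserts it; this is exactly pvAddWord (count = size)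
      have hstep : pvInnerA (ns, wi, (wi.size : Int)) w =
          (ns ++ [PySem.Int.toStr (wi.size : Int)], wi.insert w (PySem.Int.toStr (wi.size : Int)),
            (wi.size : Int) + 1) := by
        simp [pvInnerA, h]
      have haw : pvAddWord wi w = wi.insert w (PySem.Int.toStr (wi.size : Int)) := by
        simp [pvAddWord, h]
      have hsize : ((wi.insert w (PySem.Int.toStr (wi.size : Int))).size : Int)
          = (wi.size : Int) + 1 := by
        rw [PySem.Dict.size_insert]
        simp [h]
      rw [haw] at hext
      have hF : wiF.get? w = some (PySem.Int.toStr (wi.size : Int)) :=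
        hext w _ ((pvExt_foldl_addWord ws _) w _ (PySem.Dict.get?_insert_self wi w _))
      rw [hstep, ← hsize]
      rw [ih (ns ++ [PySem.Int.toStr (wi.size : Int)]) (wi.insert w (PySem.Int.toStr (wi.size : Int))) hext]
      simp [hF, haw]

-- A's outer fold = (previous corpus ++ encoded-with-wiF corpus, B's vocabulary fold, its size)
theorem pvOuter_eq (cs : List (List String)) (nc : List (List String))
    (wi wiF : PySem.Dict String String)
    (hext : pvExt (cs.foldl (fun wi s => s.foldl pvAddWord wi) wi) wiF) :
    cs.foldl pvOuterA (nc, wi, (wi.size : Int)) =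
      (nc ++ cs.map (fun s => s.map (fun w => (wiF.get? w).getD "")),
        cs.foldl (fun wi s => s.foldl pvAddWord wi) wi,
        ((cs.foldl (fun wi s => s.foldl pvAddWord wi) wi).size : Int)) := by
  induction cs generalizing nc wi with
  | nil => simp
  | cons s cs ih =>
    simp only [List.foldl_cons, List.map_cons]
    have hext1 : pvExt (s.foldl pvAddWord wi) wiF :=
      pvExt_trans (pvExt_foldl_sentences cs _) hext
    have hstep : pvOuterA (nc, wi, (wi.size : Int)) s =
        (nc ++ [s.map (fun w => (wiF.get? w).getD "")], s.foldl pvAddWord wi,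
          ((s.foldl pvAddWord wi).size : Int)) := by
      simp only [pvOuterA]
      rw [pvInner_eq s [] wi wiF hext1]
      simp
    rw [hstep, ih _ _ hext]
    simp

-- ===== VERDICT (by name: the statement is the Claim_ definition above) =====
theorem corpus_to_sequence_spec : Claim_equal_corpus_to_sequence := by
  intro corpus _
  unfold Spec_corpus_to_sequence corpus_to_sequence corpus_to_sequence_alt pvBuild
  have h0 : ((PySem.Dict.empty : PySem.Dict String String).size : Int) = 0 := by decide
  rw [← h0, pvOuter_eq corpus [] PySem.Dict.empty
    (corpus.foldl (fun wi s => s.foldl pvAddWord wi) PySem.Dict.empty) (pvExt_refl _)]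
  simp
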